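-- pv_equiv track=rewrite | github.com/mckomaken/Command-Lab-Official-Bot | lib/commands/source.py | should_suggest
-- ===== SOURCE A (Python) =====
-- def should_suggest(remaining: str, candinate: str):
--     i = 0
--     while candinate.startswith(remaining, i):
--         i += 1
--         i = candinate.find(chr(95), i)
--         if i < 0:
--             return False
--
--     return True
-- ===== SOURCE B (Python) =====
-- def should_suggest(remaining: str, candinate: str):
--     # Collect every occurrence of `remaining` in `candinate` once (substring search),
--     # then the answer is pure set membership: fail at 0 or at some underscore index.
--     occ = set()
--     j = candinate.find(remaining)
--     while j >= 0:
--         occ.add(j)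
--         j = candinate.find(remaining, j + 1)
--     if 0 not in occ:
--         return True
--     return any(c == chr(95) and j not in occ for j, c in enumerate(candinate))
-- ===== Notes on version B (the rewrite author's own statement) =====
-- stated objective: alternative
-- what changed: B inverts the algorithm: instead of walking the underscore chain and running a startswith test at each stop, it first collects the set of ALL occurrence positions of `remaining` in `candinate` via repeated str.find of `remaining`, then answers by pure set-membership tests (is 0 an occurrence, is every underscore index an occurrence) with no prefix comparison in the second phase.
import Mathlib
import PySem

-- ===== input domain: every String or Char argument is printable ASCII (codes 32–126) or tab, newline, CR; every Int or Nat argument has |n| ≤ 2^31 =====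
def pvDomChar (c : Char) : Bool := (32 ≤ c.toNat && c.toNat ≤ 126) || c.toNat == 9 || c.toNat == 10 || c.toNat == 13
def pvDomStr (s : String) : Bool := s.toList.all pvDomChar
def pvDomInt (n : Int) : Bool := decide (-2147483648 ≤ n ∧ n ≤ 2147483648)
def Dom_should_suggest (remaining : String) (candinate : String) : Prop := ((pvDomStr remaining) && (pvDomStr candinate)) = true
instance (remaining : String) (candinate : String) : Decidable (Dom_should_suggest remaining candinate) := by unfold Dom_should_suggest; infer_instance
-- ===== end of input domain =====

-- B inverts the algorithm: it first collects the set of ALL occurrence positions of `remaining`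
-- in `candinate` (repeated str.find of `remaining`), then answers by set-membership tests only
-- (objective: alternative algorithm, same asymptotic cost).

-- ===== PORT A =====
-- Python's candinate.startswith(remaining, i) for 0 ≤ i is exact as a prefix test on cs.drop i.
-- termination helper, also used by B's occurrence-collecting loop: a found index strictly
-- exceeds the start and stays within the string
theorem pvFindFrom_bounds (cs sub : List Char) (i : Nat)
    (h : ¬ PySem.Chars.findFrom cs sub ((i : Int) + 1) none < 0) :
    i < (PySem.Chars.findFrom cs sub ((i : Int) + 1) none).toNat ∧
      (PySem.Chars.findFrom cs sub ((i : Int) + 1) none).toNat ≤ cs.length := by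
  have hcast : ((i : Int) + 1) = ((i + 1 : Nat) : Int) := by push_cast; ring
  rw [hcast] at h ⊢
  by_cases hle : i + 1 ≤ cs.length
  · have heq := PySem.Chars.findFrom_natCast cs sub (i + 1) hle
    rw [heq] at h ⊢
    have hlb := PySem.Chars.neg_one_le_find (cs.drop (i + 1)) sub
    have hub := PySem.Chars.find_le_length (cs.drop (i + 1)) sub
    rw [List.length_drop] at hub
    split_ifs at h ⊢ with hf <;> omega
  · exfalso
    apply h
    simp only [PySem.Chars.findFrom]
    have : (cs.length : Int) < ((i + 1 : Nat) : Int) := by push_cast; omega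
    split_ifs <;> omega

-- the while loop of A: i is the current start index
def pvLoopA (rem cs : List Char) (i : Nat) : Bool :=
  if PySem.Chars.startswith (cs.drop i) rem then
    -- i += 1; i = candinate.find('_', i)
    let j := PySem.Chars.findFrom cs ['_'] ((i : Int) + 1) none
    if h : j < 0 then false
    else pvLoopA rem cs j.toNat
  else true
termination_by cs.length + 1 - i
decreasing_by
  have := pvFindFrom_bounds cs ['_'] i h
  omega

def should_suggest (remaining : String) (candinate : String) : Bool :=
  pvLoopA remaining.toList candinate.toList 0

-- ===== PORT B =====
-- the occurrence-collecting while loop of B: j = current find result; occ = set built so far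
def pvCollect (rem cs : List Char) (occ : PySem.Set Int) (j : Int) : PySem.Set Int :=
  if j < 0 then occ
  else
    let occ' := PySem.Set.add occ j
    let j' := PySem.Chars.findFrom cs rem (j + 1) none
    if h : j' < 0 then occ'
    else pvCollect rem cs occ' j'
termination_by cs.length + 1 - j.toNat
decreasing_by
  have hj : ((j.toNat : Int)) = j := by omega
  have := pvFindFrom_bounds cs rem j.toNat (by rw [hj]; exact h)
  rw [hj] at this
  omega

-- the generator of B's `any` with its early exit
def pvAnyU (occ : PySem.Set Int) : List (Int × Char) → Bool
  | [] => false
  | (j, c) :: rest =>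
    if (c == '_') && ! PySem.Set.contains occ j then true else pvAnyU occ rest

def should_suggest_alt (remaining : String) (candinate : String) : Bool :=
  let rem := remaining.toList
  let cs := candinate.toList
  let occ := pvCollect rem cs PySem.Set.empty (PySem.Chars.find cs rem)
  if ! PySem.Set.contains occ 0 then true
  else pvAnyU occ (PySem.List.enumerate cs 0)

-- ===== PRECONDITION & SPEC =====
def Spec_should_suggest (remaining : String) (candinate : String) (out : Bool) : Prop := out = should_suggest_alt remaining candinate
instance (remaining : String) (candinate : String) (out : Bool) : Decidable (Spec_should_suggest remaining candinate out) := by unfold Spec_should_suggest; infer_instance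

-- ===== CLAIM (what is proved, stated in full; the proofs are below) =====
def Claim_equal_should_suggest : Prop := ∀ (remaining : String) (candinate : String), Dom_should_suggest remaining candinate → Spec_should_suggest remaining candinate (should_suggest remaining candinate)

-- ===== LEMMAS AND PROOFS =====

-- a one-char list is a prefix of l iff l's head is that char
theorem pvSingleton_prefix (c : Char) (l : List Char) : [c] <+: l ↔ l.head? = some c := by
  cases l with
  | nil => simp
  | cons x xs =>
    constructor
    · rintro ⟨t, ht⟩
      simp at ht
      simp [ht.1]
    · intro hx
      simp at hx
      exact ⟨xs, by simp [hx]⟩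

-- underscore found at index j of cs, as a prefix statement about drops
theorem pvPrefix_iff_getElem (cs : List Char) (j : Nat) :
    ['_'] <+: cs.drop j ↔ cs[j]? = some '_' := by
  rw [pvSingleton_prefix, List.head?_drop]

-- an occurrence at p ≥ k is an infix of cs.drop k
theorem pvInfix_of_occ (rem cs : List Char) (k p : Nat) (hkp : k ≤ p)
    (hocc : rem <+: cs.drop p) : rem <:+: cs.drop k := by
  have hsuf : cs.drop p <:+ cs.drop k := by
    have h' : (cs.drop k).drop (p - k) = cs.drop p := by
      rw [List.drop_drop]; congr 1; omega
    rw [← h']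
    exact List.drop_suffix _ _
  exact List.IsInfix.trans hocc.isInfix hsuf.isInfix

-- A's loop, characterised: a failure at i or at some underscore index beyond i
theorem pvLoopA_char (rem cs : List Char) (i : Nat) :
    pvLoopA rem cs i = true ↔
      (PySem.Chars.startswith (cs.drop i) rem = false ∨
        ∃ j : Nat, i < j ∧ cs[j]? = some '_' ∧ PySem.Chars.startswith (cs.drop j) rem = false) := by
  induction i using pvLoopA.induct rem cs with
  | case1 i hsw j hneg =>
    -- startswith holds, no further underscore: loop returns false
    have hneg' : PySem.Chars.findFrom cs ['_'] ((i : Int) + 1) none < 0 := hneg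
    have hfalse : pvLoopA rem cs i = false := by
      rw [pvLoopA]; simp [hsw, hneg']
    rw [hfalse]
    simp only [Bool.false_eq_true, false_iff]
    rintro (h | ⟨j', hj', hU, hs⟩)
    · rw [hsw] at h; exact Bool.noConfusion h
    · have hjlt : j' < cs.length := by
        by_contra hge
        rw [List.getElem?_eq_none (by omega)] at hU
        exact absurd hU (by simp)
      have hle : i + 1 ≤ cs.length := by omega
      have hcast : ((i : Int) + 1) = ((i + 1 : Nat) : Int) := by push_cast; ring
      have heq : PySem.Chars.findFrom cs ['_'] ((i + 1 : Nat) : Int) none = -1 := by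
        by_contra hne
        obtain ⟨h1, -, -⟩ := PySem.Chars.findFrom_natCast_spec cs ['_'] (i + 1) hle hne
        rw [← hcast] at h1
        omega
      rw [PySem.Chars.findFrom_natCast_eq_neg_one_iff cs ['_'] (i + 1) hle] at heq
      exact heq (pvInfix_of_occ ['_'] cs (i + 1) j' (by omega) ((pvPrefix_iff_getElem cs j').mpr hU))
  | case2 i hsw j hneg ih =>
    -- startswith holds, next underscore found: recurse
    have hneg' : ¬ PySem.Chars.findFrom cs ['_'] ((i : Int) + 1) none < 0 := hneg
    have hb := pvFindFrom_bounds cs ['_'] i hneg'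
    have hrec : pvLoopA rem cs i =
        pvLoopA rem cs (PySem.Chars.findFrom cs ['_'] ((i : Int) + 1) none).toNat := by
      rw [pvLoopA]; simp [hsw, hneg']
    have ih' : pvLoopA rem cs (PySem.Chars.findFrom cs ['_'] ((i : Int) + 1) none).toNat = true ↔
        (PySem.Chars.startswith
            (cs.drop (PySem.Chars.findFrom cs ['_'] ((i : Int) + 1) none).toNat) rem = false ∨
          ∃ j' : Nat, (PySem.Chars.findFrom cs ['_'] ((i : Int) + 1) none).toNat < j' ∧
            cs[j']? = some '_' ∧ PySem.Chars.startswith (cs.drop j') rem = false) := ih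
    rw [hrec, ih']
    have hcast : ((i : Int) + 1) = ((i + 1 : Nat) : Int) := by push_cast; ring
    have hle : i + 1 ≤ cs.length := by omega
    have hne : PySem.Chars.findFrom cs ['_'] ((i + 1 : Nat) : Int) none ≠ -1 := by
      rw [← hcast]; omega
    obtain ⟨h1, h2, h3⟩ := PySem.Chars.findFrom_natCast_spec cs ['_'] (i + 1) hle hne
    rw [← hcast] at h1 h2 h3
    have hU : cs[(PySem.Chars.findFrom cs ['_'] ((i : Int) + 1) none).toNat]? = some '_' :=
      (pvPrefix_iff_getElem cs _).mp h2
    constructor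
    · rintro (h | ⟨j', hj', hU', hs'⟩)
      · exact Or.inr ⟨_, hb.1, hU, h⟩
      · exact Or.inr ⟨j', by omega, hU', hs'⟩
    · rintro (h | ⟨j', hj', hU', hs'⟩)
      · rw [hsw] at h; exact Bool.noConfusion h
      · -- j' > i with an underscore: minimality of the found index
        have hge : (PySem.Chars.findFrom cs ['_'] ((i : Int) + 1) none).toNat ≤ j' := by
          by_contra hlt
          exact h3 j' (by omega) (by omega) ((pvPrefix_iff_getElem cs j').mpr hU')
        rcases Nat.eq_or_lt_of_le hge with heq | hlt
        · exact Or.inl (heq ▸ hs')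
        · exact Or.inr ⟨j', hlt, hU', hs'⟩
  | case3 i hsw =>
    have htrue : pvLoopA rem cs i = true := by
      rw [pvLoopA]; simp [hsw]
    rw [htrue]
    simp only [true_iff]
    exact Or.inl (by simpa using hsw)

-- Set.contains as list membership
theorem pvContains_iff (s : PySem.Set Int) (x : Int) :
    PySem.Set.contains s x = true ↔ x ∈ s := by
  unfold PySem.Set.contains
  exact List.contains_iff_mem

-- B's collect loop, characterised: occ plus every occurrence at or beyond j
theorem pvCollect_mem (rem cs : List Char) (occ : PySem.Set Int) (j : Int) (x : Int) :
    (0 ≤ j → (j.toNat ≤ cs.length ∧ rem <+: cs.drop j.toNat)) →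
    (x ∈ pvCollect rem cs occ j ↔
      x ∈ occ ∨ (0 ≤ j ∧
        ∃ p : Nat, j ≤ (p : Int) ∧ p ≤ cs.length ∧ rem <+: cs.drop p ∧ x = (p : Int))) := by
  induction occ, j using pvCollect.induct rem cs with
  | case1 occ j hneg =>
    intro _
    rw [pvCollect]
    simp only [if_pos hneg]
    constructor
    · exact Or.inl
    · rintro (h | ⟨h0, -⟩)
      · exact h
      · omega
  | case2 occ j hpos j'v hneg =>
    intro hj
    have h0 : (0 : Int) ≤ j := by omega
    obtain ⟨hjlen, hjocc⟩ := hj h0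
    have hneg' : PySem.Chars.findFrom cs rem (j + 1) none < 0 := hneg
    have hres : pvCollect rem cs occ j = PySem.Set.add occ j := by
      rw [pvCollect]; simp [hpos, hneg']
    rw [hres, PySem.Set.mem_add]
    constructor
    · rintro (h | hx)
      · exact Or.inl h
      · exact Or.inr ⟨h0, j.toNat, by omega, hjlen, hjocc, by omega⟩
    · rintro (h | ⟨-, p, hjp, hplen, hocc, rfl⟩)
      · exact Or.inl h
      · -- the listed occurrence must be j itself (none later: findFrom gave a negative)
        rcases Nat.lt_or_ge j.toNat p with hlt | hge
        · exfalso
          have hkle : j.toNat + 1 ≤ cs.length := by omega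
          have hcast : (j : Int) + 1 = ((j.toNat + 1 : Nat) : Int) := by omega
          have heq : PySem.Chars.findFrom cs rem ((j.toNat + 1 : Nat) : Int) none = -1 := by
            by_contra hne
            obtain ⟨h1, -, -⟩ := PySem.Chars.findFrom_natCast_spec cs rem (j.toNat + 1) hkle hne
            rw [← hcast] at h1
            omega
          rw [PySem.Chars.findFrom_natCast_eq_neg_one_iff cs rem (j.toNat + 1) hkle] at heq
          exact heq (pvInfix_of_occ rem cs (j.toNat + 1) p (by omega) hocc)
        · right
          omega
  | case3 occ j hpos occ'v j'v hneg ih =>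
    intro hj
    have h0 : (0 : Int) ≤ j := by omega
    obtain ⟨hjlen, hjocc⟩ := hj h0
    have hneg' : ¬ PySem.Chars.findFrom cs rem (j + 1) none < 0 := hneg
    have hres : pvCollect rem cs occ j =
        pvCollect rem cs (PySem.Set.add occ j) (PySem.Chars.findFrom cs rem (j + 1) none) := by
      rw [pvCollect]; simp [hpos, hneg']
    have hb := pvFindFrom_bounds cs rem j.toNat
      (by rw [show ((j.toNat : Int)) + 1 = (j : Int) + 1 by omega]; exact hneg')
    rw [show ((j.toNat : Int)) + 1 = (j : Int) + 1 by omega] at hb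
    have hkle : j.toNat + 1 ≤ cs.length := by omega
    have hcast : (j : Int) + 1 = ((j.toNat + 1 : Nat) : Int) := by omega
    have hne : PySem.Chars.findFrom cs rem ((j.toNat + 1 : Nat) : Int) none ≠ -1 := by
      rw [← hcast]; omega
    obtain ⟨h1, h2, h3⟩ := PySem.Chars.findFrom_natCast_spec cs rem (j.toNat + 1) hkle hne
    rw [← hcast] at h1 h2 h3
    have hj' : 0 ≤ PySem.Chars.findFrom cs rem (j + 1) none := by omega
    rw [hres, ih (fun _ => ⟨hb.2, h2⟩), PySem.Set.mem_add]
    constructor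
    · rintro ((h | hx) | ⟨-, p, hjp, hplen, hocc, rfl⟩)
      · exact Or.inl h
      · exact Or.inr ⟨h0, j.toNat, by omega, hjlen, hjocc, by omega⟩
      · exact Or.inr ⟨h0, p, by omega, hplen, hocc, rfl⟩
    · rintro (h | ⟨-, p, hjp, hplen, hocc, rfl⟩)
      · exact Or.inl (Or.inl h)
      · rcases Nat.lt_or_ge j.toNat p with hlt | hge
        · -- p > j: by minimality p is at or beyond the next found index
          have hgt : (PySem.Chars.findFrom cs rem (j + 1) none).toNat ≤ p := by
            by_contra hltp
            exact h3 p (by omega) (by omega) hocc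
          exact Or.inr ⟨hj', p, by omega, hplen, hocc, rfl⟩
        · exact Or.inl (Or.inr (by omega))

-- the full occurrence set: exactly the positions p ≤ |cs| where rem is a prefix of cs.drop p
theorem pvOcc_mem (rem cs : List Char) (x : Int) :
    x ∈ pvCollect rem cs PySem.Set.empty (PySem.Chars.find cs rem) ↔
      ∃ p : Nat, p ≤ cs.length ∧ rem <+: cs.drop p ∧ x = (p : Int) := by
  rcases lt_or_ge (PySem.Chars.find cs rem) 0 with hneg | hpos
  · have hres : pvCollect rem cs PySem.Set.empty (PySem.Chars.find cs rem) = PySem.Set.empty := by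
      rw [pvCollect]; simp [hneg]
    rw [hres]
    have hni : ¬ rem <:+: cs := by
      rw [← PySem.Chars.find_eq_neg_one_iff]
      have := PySem.Chars.neg_one_le_find cs rem
      omega
    constructor
    · intro h; exact absurd h (by simp [PySem.Set.empty])
    · rintro ⟨p, hplen, hocc, -⟩
      exact absurd (by simpa using pvInfix_of_occ rem cs 0 p (by omega) hocc) hni
  · obtain ⟨hocc0, hmin⟩ := PySem.Chars.find_spec hpos
    have hlen : (PySem.Chars.find cs rem).toNat ≤ cs.length := by
      have := PySem.Chars.find_le_length cs rem
      omega
    rw [pvCollect_mem rem cs PySem.Set.empty (PySem.Chars.find cs rem) x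
      (fun _ => ⟨hlen, hocc0⟩)]
    have hemp : x ∉ (PySem.Set.empty : PySem.Set Int) := by simp [PySem.Set.empty]
    constructor
    · rintro (h | ⟨-, p, -, hplen, hp, rfl⟩)
      · exact absurd h hemp
      · exact ⟨p, hplen, hp, rfl⟩
    · rintro ⟨p, hplen, hp, rfl⟩
      have : (PySem.Chars.find cs rem).toNat ≤ p := by
        by_contra hlt
        exact hmin p (by omega) hp
      exact Or.inr ⟨hpos, p, by omega, hplen, hp, rfl⟩

-- B's any-loop, characterised
theorem pvAnyU_char (occ : PySem.Set Int) (l : List (Int × Char)) :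
    pvAnyU occ l = true ↔
      ∃ jc ∈ l, jc.2 = '_' ∧ PySem.Set.contains occ jc.1 = false := by
  induction l with
  | nil => simp [pvAnyU]
  | cons jc rest ih =>
    obtain ⟨j, c⟩ := jc
    rw [pvAnyU]
    by_cases h : ((c == '_') && ! PySem.Set.contains occ j) = true
    · rw [if_pos h]
      simp only [Bool.and_eq_true, beq_iff_eq, Bool.not_eq_true'] at h
      exact ⟨fun _ => ⟨(j, c), List.mem_cons_self, h.1, h.2⟩, fun _ => rfl⟩
    · rw [if_neg h, ih]
      simp only [Bool.and_eq_true, beq_iff_eq, Bool.not_eq_true', not_and] at h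
      constructor
      · rintro ⟨jc', hm, hc, hnc⟩
        exact ⟨jc', List.mem_cons_of_mem _ hm, hc, hnc⟩
      · rintro ⟨jc', hm, hc, hnc⟩
        rcases List.mem_cons.mp hm with rfl | hm'
        · exact absurd hnc (h hc)
        · exact ⟨jc', hm', hc, hnc⟩

-- ===== VERDICT (by name: the statement is the Claim_ definition above) =====
theorem should_suggest_spec : Claim_equal_should_suggest := by
  unfold Claim_equal_should_suggest Spec_should_suggest
  intro remaining candinate _
  unfold should_suggest should_suggest_alt
  set rem := remaining.toList
  set cs := candinate.toList
  set occ := pvCollect rem cs PySem.Set.empty (PySem.Chars.find cs rem) with hocc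
  have hmem : ∀ x : Int, PySem.Set.contains occ x = true ↔
      ∃ p : Nat, p ≤ cs.length ∧ rem <+: cs.drop p ∧ x = (p : Int) := fun x => by
    rw [pvContains_iff, hocc, pvOcc_mem]
  rw [Bool.eq_iff_iff, pvLoopA_char]
  by_cases h0 : PySem.Set.contains occ 0 = true
  · -- 0 is an occurrence: remaining is a prefix at 0
    have hpre0 : rem <+: cs := by
      obtain ⟨p, -, hp, hx⟩ := (hmem 0).mp h0
      have hp0 : p = 0 := by omega
      simpa [hp0] using hp
    rw [if_neg (show ¬ (!PySem.Set.contains occ 0) = true by rw [h0]; simp), pvAnyU_char]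
    constructor
    · rintro (h | ⟨j, -, hU, hs⟩)
      · exfalso
        have htrue := (PySem.Chars.startswith_iff (cs.drop 0) rem).mpr (by simpa using hpre0)
        rw [h] at htrue
        exact Bool.noConfusion htrue
      · have hjlt : j < cs.length := by
          by_contra hge
          rw [List.getElem?_eq_none (by omega)] at hU
          exact absurd hU (by simp)
        have hUc : cs[j] = '_' := by
          rw [List.getElem?_eq_getElem hjlt] at hU
          exact Option.some.inj hU
        refine ⟨((j : Int), '_'), ?_, rfl, ?_⟩
        · rw [PySem.List.mem_enumerate_iff]
          exact ⟨j, hjlt, by simp [hUc]⟩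
        · rw [Bool.eq_false_iff, Ne, hmem]
          rintro ⟨p, -, hp, hpx⟩
          have hpj : p = j := by omega
          subst hpj
          rw [Bool.eq_false_iff] at hs
          exact hs ((PySem.Chars.startswith_iff _ rem).mpr hp)
    · rintro ⟨⟨j, c⟩, hm, hc, hnc⟩
      rw [PySem.List.mem_enumerate_iff] at hm
      obtain ⟨k, hk, hpair⟩ := hm
      simp only [Prod.mk.injEq] at hpair
      obtain ⟨rfl, rfl⟩ := hpair
      have hc' : cs[k] = '_' := hc
      have hnc' : PySem.Set.contains occ (0 + (k : Int)) = false := hnc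
      refine Or.inr ⟨k, ?_, ?_, ?_⟩
      · -- k > 0: position 0 is in occ, this one is not
        rcases Nat.eq_zero_or_pos k with rfl | hkpos
        · exfalso
          have : PySem.Set.contains occ 0 = false := by simpa using hnc'
          rw [h0] at this
          exact Bool.noConfusion this
        · exact hkpos
      · rw [List.getElem?_eq_getElem hk, hc']
      · rw [Bool.eq_false_iff, Ne, PySem.Chars.startswith_iff]
        intro hp
        rw [Bool.eq_false_iff] at hnc'
        exact hnc' ((hmem _).mpr ⟨k, by omega, hp, by omega⟩)
  · -- 0 is not an occurrence: remaining fails at 0, both sides are true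
    have hnpre : ¬ rem <+: cs := by
      intro hp
      exact h0 ((hmem 0).mpr ⟨0, by omega, by simpa using hp, by simp⟩)
    rw [if_pos (show (!PySem.Set.contains occ 0) = true by simp only [Bool.not_eq_true] at h0; rw [h0]; simp)]
    simp only [iff_true]
    refine Or.inl ?_
    rw [Bool.eq_false_iff, Ne, PySem.Chars.startswith_iff]
    simpa using hnpre
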